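-- pv_equiv track=rewrite | github.com/yuwash/FlashM | flashm/playback.py | playback_iter
-- ===== SOURCE A (Python) =====
-- from itertools import islice
--
-- def playback_iter(items, unit=2, reps=2):
--     """
--     >>> list(playback_iter('abcde', unit=3))
--     ['a', 'b', 'c', 'a', 'b', 'c', 'd', 'e', None, 'd', 'e', None]
--     """
--     len_in_unit, remaining = divmod(len(items), unit)
--     for unit_start in range(0, unit*len_in_unit, unit):
--         unit_stop = unit_start + unit
--         for _ in range(reps):
--             for item in islice(items, unit_start, unit_stop):
--                 yield item
--     for _ in range(reps):
--         for item in islice(items, unit*len_in_unit, None):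
--             yield item
--         if remaining:
--             for _ in range(unit - remaining):
--                 yield  # fill up to the next full unit with None
-- ===== SOURCE B (Python) =====
-- def playback_iter(items, unit=2, reps=2):
--     lst = list(items)
--     n = len(lst)
--     nblocks = max(0, -(-n // unit))  # ceil(n/unit); number of (padded) units
--     period = unit * reps             # output positions produced per unit
--     for t in range(nblocks * period):
--         j = (t // period) * unit + t % unit  # source index for output position t
--         yield lst[j] if j < n else None
-- ===== Notes on version B (the rewrite author's own statement) =====
-- stated objective: alternative
-- what changed: B replaces A's nested chunk/repetition loops and special-cased trailing partial unit with a single flat loop over output positions, computing each source index by closed-form div/mod arithmetic (j = (t//(unit*reps))*unit + t%unit) and yielding None when j falls past the end.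
import Mathlib
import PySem

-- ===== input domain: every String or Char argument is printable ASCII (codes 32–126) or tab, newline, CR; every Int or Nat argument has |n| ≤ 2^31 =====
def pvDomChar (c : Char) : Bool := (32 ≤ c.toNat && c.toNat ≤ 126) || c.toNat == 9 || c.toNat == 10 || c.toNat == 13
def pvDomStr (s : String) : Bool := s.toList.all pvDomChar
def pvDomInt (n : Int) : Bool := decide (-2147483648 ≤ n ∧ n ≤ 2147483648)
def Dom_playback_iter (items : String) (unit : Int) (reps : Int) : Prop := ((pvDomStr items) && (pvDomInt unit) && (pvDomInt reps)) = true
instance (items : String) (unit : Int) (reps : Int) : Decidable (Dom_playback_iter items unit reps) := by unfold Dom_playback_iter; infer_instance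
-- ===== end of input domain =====

-- B replaces A's nested chunk/repetition loops (with a special-cased trailing partial unit)
-- by one flat loop over output positions with a closed-form source index; same cost ('alternative').

-- ===== PORT A =====
-- Port of A: divmod-based loop over full units, then a special trailing block that
-- replays the partial unit and fills it with None.
def playback_iter (items : String) (unit : Int) (reps : Int) : List (Option String) :=
  let cs := items.toList
  let n : Int := cs.length
  let len_in_unit := PySem.Int.floordiv n unit
  let remaining := PySem.Int.mod n unit
  let part1 :=
    (PySem.List.pyRange 0 (unit * len_in_unit) unit).foldl (fun acc unit_start =>
      (PySem.List.pyRange 0 reps 1).foldl (fun acc2 _ =>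
        acc2 ++ (PySem.List.slice cs (some unit_start) (some (unit_start + unit))).map
          (fun c => some (String.ofList [c]))) acc) []
  (PySem.List.pyRange 0 reps 1).foldl (fun acc _ =>
    let acc2 := acc ++ (PySem.List.slice cs (some (unit * len_in_unit)) none).map
      (fun c => some (String.ofList [c]))
    if remaining ≠ 0 then
      (PySem.List.pyRange 0 (unit - remaining) 1).foldl
        (fun a _ => a ++ [(none : Option String)]) acc2
    else acc2) part1

-- ===== PORT B =====
-- Port of B: one flat loop over all output positions t; the source index for position t
-- is computed arithmetically as (t // (unit*reps)) * unit + t % unit, yielding None past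
-- the end of the list.  (lst[j] is ported as (pyGet? lst j).getD none: inside the loop
-- 0 ≤ j < n always holds, so the IndexError branch / default is unreachable.)
def playback_iter_alt (items : String) (unit : Int) (reps : Int) : List (Option String) :=
  let lst := items.toList.map (fun c => some (String.ofList [c]))
  let n : Int := lst.length
  let nblocks := max 0 (-(PySem.Int.floordiv (-n) unit))
  let period := unit * reps
  (PySem.List.pyRange 0 (nblocks * period) 1).map (fun t =>
    let j := PySem.Int.floordiv t period * unit + PySem.Int.mod t unit
    if j < n then (PySem.List.pyGet? lst j).getD none else none)

-- ===== PRECONDITION & SPEC =====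
-- Pre_ excludes only unit = 0, where A raises ZeroDivisionError (divmod by zero).
def Pre_playback_iter (items : String) (unit : Int) (reps : Int) : Prop := unit ≠ 0
instance (items : String) (unit : Int) (reps : Int) : Decidable (Pre_playback_iter items unit reps) := by unfold Pre_playback_iter; infer_instance
def pvWitness_playback_iter : String × Int × Int := ("abcde", 3, 2)
def Spec_playback_iter (items : String) (unit : Int) (reps : Int) (out : List (Option String)) : Prop := out = playback_iter_alt items unit reps
instance (items : String) (unit : Int) (reps : Int) (out : List (Option String)) : Decidable (Spec_playback_iter items unit reps out) := by unfold Spec_playback_iter; infer_instance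

-- ===== CLAIM (what is proved, stated in full; the proofs are below) =====
def Claim_equal_playback_iter : Prop := ∀ (items : String) (unit : Int) (reps : Int), Dom_playback_iter items unit reps → Pre_playback_iter items unit reps → Spec_playback_iter items unit reps (playback_iter items unit reps)

-- ===== LEMMAS AND PROOFS =====

-- one repetition block: 'for _ in range(reps): yield each element of b'
def pvRep (reps : Int) (b : List (Option String)) : List (Option String) :=
  (PySem.List.pyRange 0 reps 1).flatMap (fun _ => b)

-- the common closed form both ports are reduced to (for a positive unit)
def pvCF (items : String) (un : Nat) (reps : Int) : List (Option String) :=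
  (List.range (items.toList.length / un)).flatMap
    (fun k => pvRep reps (((items.toList.drop (un*k)).take un).map
      (fun c => some (String.ofList [c]))))
  ++ pvRep reps
      ((items.toList.drop (un*(items.toList.length/un))).map (fun c => some (String.ofList [c]))
       ++ (if items.toList.length % un ≠ 0
           then List.replicate (un - items.toList.length % un) (none : Option String)
           else []))

theorem pvFlatMapCongr {α β : Type} {l : List α} {f g : α → List β}
    (h : ∀ x ∈ l, f x = g x) : l.flatMap f = l.flatMap g := by
  simp only [List.flatMap_def]
  rw [List.map_congr_left h]

theorem pvFlatMapConst {α β : Type} (l : List α) (x : β) :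
    l.flatMap (fun _ => [x]) = List.replicate l.length x := by
  induction l with
  | nil => rfl
  | cons a t ih => simp [ih, List.replicate_succ]

theorem pvFlatMapConstList {α β : Type} (l : List α) (b : List β) :
    l.flatMap (fun _ => b) = (List.replicate l.length b).flatten := by
  induction l with
  | nil => rfl
  | cons a t ih => simp [ih, List.replicate_succ]

theorem pvFlatMapNilConst {α β : Type} (l : List α) :
    l.flatMap (fun _ => ([] : List β)) = [] := by
  induction l with
  | nil => rfl
  | cons a t ih => simp [ih]

theorem pvRepNonpos (reps : Int) (b : List (Option String)) (h : reps ≤ 0) :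
    pvRep reps b = [] := by
  simp [pvRep, PySem.List.pyRange_one_eq_nil h]

theorem pvRangeNegNil (b s : Int) (hs : s < 0) (hb : 0 ≤ b) :
    PySem.List.pyRange 0 b s = [] := by
  unfold PySem.List.pyRange
  rw [if_neg hs.ne, if_neg (by omega : ¬ (0:Int) < s), if_neg (by omega : ¬ b < (0:Int))]
  simp

theorem pvRangeMul (u m : Nat) (hu : 0 < u) :
    PySem.List.pyRange 0 ((u*m : Nat):Int) ((u:Nat):Int)
      = (List.range m).map (fun k => ((u*k : Nat) : Int)) := by
  rw [PySem.List.pyRange_of_pos _ _ (by exact_mod_cast hu)]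
  rcases Nat.eq_zero_or_pos m with hm | hm
  · subst hm; simp
  · rw [if_pos (by push_cast; positivity)]
    have h1 : ((u*m : Nat):Int) - 0 + (u:Int) - 1 = ((u*m + u - 1 : Nat) : Int) := by push_cast; omega
    rw [h1, ← Int.natCast_div]
    have h2 : (u*m + u - 1)/u = m := by
      have h3 : u*m + u - 1 = (u-1) + m*u := by rw [Nat.mul_comm u m]; omega
      rw [h3, Nat.add_mul_div_right _ _ hu, Nat.div_eq_of_lt (by omega)]; omega
    rw [h2, Int.toNat_natCast]
    apply List.map_congr_left
    intro k _
    push_cast; ring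

-- closed form of port A for a positive unit
theorem pvA_pos (items : String) (un : Nat) (reps : Int) (hun : 0 < un) :
    playback_iter items ((un:Nat):Int) reps = pvCF items un reps := by
  simp only [playback_iter, pvRep, pvCF]
  have hfd := PySem.Int.floordiv_natCast items.toList.length un
  have hmd := PySem.Int.mod_natCast items.toList.length un
  have hc : ((un:Nat):Int) * ((items.toList.length / un : Nat):Int)
      = ((un * (items.toList.length / un) : Nat) : Int) := by push_cast; ring
  have hmlt : items.toList.length % un < un := Nat.mod_lt _ hun
  have hsub : ((un:Nat):Int) - ((items.toList.length % un : Nat):Int)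
      = ((un - items.toList.length % un : Nat) : Int) := by push_cast [Nat.le_of_lt hmlt]; ring
  simp only [hfd, hmd, hc, hsub, pvRangeMul un _ hun, List.foldl_map,
    PySem.List.foldl_append_eq_flatMap, PySem.List.slice_natCast_add,
    PySem.List.slice_from_natCast, PySem.List.pyRange_zero_nat, ne_eq, Nat.cast_eq_zero,
    pvFlatMapConst, List.length_range, List.nil_append, List.append_assoc]
  by_cases hr : items.length % un = 0
  · simp [hr, pvFlatMapConstList, PySem.List.length_pyRange_one]
  · simp [hr, pvFlatMapConstList, PySem.List.length_pyRange_one]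

theorem pvA_neg (items : String) (unit reps : Int) (hu : unit < 0) :
    playback_iter items unit reps = [] := by
  simp only [playback_iter]
  have hqr : unit * PySem.Int.floordiv (items.toList.length : Int) unit
      = (items.toList.length : Int) - PySem.Int.mod (items.toList.length : Int) unit := by
    have := PySem.Int.floordiv_mul_add_mod (items.toList.length : Int) unit
    rw [Int.mul_comm]; omega
  have hrb := PySem.Int.mod_neg_bounds (items.toList.length : Int) hu
  have hq0 : 0 ≤ unit * PySem.Int.floordiv (items.toList.length : Int) unit := by
    have := Int.natCast_nonneg items.toList.length; omega
  rw [pvRangeNegNil _ _ hu hq0]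
  simp only [List.foldl_nil]
  have hsl : PySem.List.slice items.toList
      (some (unit * PySem.Int.floordiv (items.toList.length : Int) unit)) none = [] := by
    rw [PySem.List.slice_from _ hq0]
    exact List.drop_eq_nil_of_le (by omega)
  have hfill : PySem.List.pyRange 0
      (unit - PySem.Int.mod (items.toList.length : Int) unit) 1 = [] :=
    PySem.List.pyRange_one_eq_nil (by omega)
  simp only [hsl, hfill, List.map_nil, List.append_nil, List.foldl_nil, ite_self,
    PySem.List.foldl_ignore]

-- decomposition of range (b*p) into b consecutive blocks of length p
theorem pvRangeMulFlatMap (b p : Nat) :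
    List.range (b*p) = (List.range b).flatMap (fun i => (List.range p).map (fun s => i*p + s)) := by
  induction b with
  | zero => simp
  | succ b ih =>
    rw [Nat.succ_mul, List.range_add, ih, List.range_succ]
    simp

-- ceil(n/unit) computed by the Python idiom -(-n // unit), for a positive unit
theorem pvCeilDiv (n un : Nat) (hun : 0 < un) :
    max 0 (-(PySem.Int.floordiv (-((n:Nat):Int)) ((un:Nat):Int))) = (((n + un - 1)/un : Nat) : Int) := by
  set c : Nat := (n + un - 1)/un with hc
  rcases Nat.eq_zero_or_pos n with hn | hn
  · have hc0 : c = 0 := by rw [hc, hn]; exact Nat.div_eq_of_lt (by omega)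
    subst hn
    simp [hc0, PySem.Int.floordiv]
  · have hdm := Nat.div_add_mod (n + un - 1) un
    rw [← hc] at hdm
    have hmlt : (n + un - 1) % un < un := Nat.mod_lt _ hun
    have hle : n ≤ un * c := by omega
    have hlt : un * c - n < un := by omega
    have hfd : PySem.Int.floordiv (-((n:Nat):Int)) ((un:Nat):Int) = -((c:Nat):Int) := by
      rw [PySem.Int.floordiv_eq_ediv_of_pos (by exact_mod_cast hun)]
      have hsplit : -((n:Nat):Int) = ((un * c - n : Nat):Int) + ((un:Nat):Int) * (-((c:Nat):Int)) := by
        push_cast [hle]; ring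
      rw [hsplit, Int.add_mul_ediv_left _ _ (by exact_mod_cast hun.ne')]
      rw [Int.ediv_eq_zero_of_lt (by positivity) (by exact_mod_cast hlt)]
      ring
    rw [hfd]
    have : (0:Int) ≤ ((c:Nat):Int) := by positivity
    omega

-- the per-block emission of port B: unit consecutive source positions, None past the end
def pvInner (lst : List (Option String)) (n un i : Nat) : List (Option String) :=
  (List.range un).map (fun s => if i*un+s < n then lst.getD (i*un+s) none else none)

theorem pvInnerFull (lst : List (Option String)) (un i : Nat)
    (hfull : i*un + un ≤ lst.length) :
    pvInner lst lst.length un i = (lst.drop (un*i)).take un := by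
  have hcm : un*i = i*un := Nat.mul_comm un i
  apply List.ext_getElem
  · simp [pvInner]
    omega
  · intro k hk1 hk2
    simp only [pvInner, List.length_map, List.length_range] at hk1
    simp only [pvInner, List.getElem_map, List.getElem_range, List.getElem_take,
      List.getElem_drop]
    rw [if_pos (by omega)]
    rw [List.getD_eq_getElem _ _ (by omega)]
    congr 1
    omega

theorem pvInnerLast (lst : List (Option String)) (un q : Nat)
    (hq : un*q ≤ lst.length) (hlt : lst.length < un*q + un) :
    pvInner lst lst.length un q
      = lst.drop (un*q) ++ List.replicate (un - lst.length % un) (none : Option String) := by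
  have hmod : lst.length % un = lst.length - un*q ∨ un = 0 := by
    rcases Nat.eq_zero_or_pos un with h | h
    · right; exact h
    · left
      have hcm : un*q = q*un := Nat.mul_comm un q
      have h2 : lst.length % un = (lst.length - un*q + q*un) % un := by
        congr 1; omega
      rw [h2, Nat.add_mul_mod_self_right, Nat.mod_eq_of_lt (by omega)]
  rcases hmod with hmod | hz
  · have hcm : un*q = q*un := Nat.mul_comm un q
    apply List.ext_getElem
    · simp [pvInner]
      omega
    · intro k hk1 hk2
      simp only [pvInner, List.length_map, List.length_range] at hk1
      simp only [pvInner, List.getElem_map, List.getElem_range]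
      by_cases hk : q*un + k < lst.length
      · rw [if_pos hk, List.getD_eq_getElem _ _ (by omega),
          List.getElem_append_left (by simp; omega)]
        simp only [List.getElem_drop]
        congr 1
        omega
      · rw [if_neg hk, List.getElem_append_right (by simp; omega)]
        simp
  · omega

theorem pvRangeMulFlatMap' (p R : Nat) :
    List.range (p*R) = (List.range R).flatMap (fun r => (List.range p).map (fun s => r*p + s)) := by
  rw [Nat.mul_comm]; exact pvRangeMulFlatMap R p

theorem pvRepNat (R : Nat) (x : List (Option String)) :
    pvRep ((R:Nat):Int) x = (List.range R).flatMap (fun _ => x) := by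
  rw [pvRep, PySem.List.pyRange_zero_nat]
  simp [List.flatMap_map]

-- closed form of port B for a positive unit and positive reps
theorem pvB_pos (items : String) (un R : Nat) (hun : 0 < un) (hR : 0 < R) :
    playback_iter_alt items ((un:Nat):Int) ((R:Nat):Int) = pvCF items un ((R:Nat):Int) := by
  have hP : 0 < un*R := Nat.mul_pos hun hR
  simp only [playback_iter_alt, List.length_map]
  rw [pvCeilDiv items.toList.length un hun]
  set f : Char → Option String := fun c => some (String.ofList [c]) with hf
  set lst : List (Option String) := items.toList.map f with hlst
  set n : Nat := items.toList.length with hn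
  have hlen : lst.length = n := by rw [hlst, hn]; exact List.length_map ..
  set c : Nat := (n + un - 1)/un with hc
  set q : Nat := n / un with hq
  have hdm : q*un + n % un = n := by
    have h := Nat.div_add_mod n un
    rw [← hq, Nat.mul_comm] at h
    exact h
  have hqc : un*q = q*un := Nat.mul_comm un q
  have hprod : ((c:Nat):Int) * (((un:Nat):Int) * ((R:Nat):Int)) = ((c*(un*R) : Nat):Int) := by
    push_cast; ring
  rw [hprod, PySem.List.pyRange_zero_nat, pvRangeMulFlatMap c (un*R), List.map_flatMap, List.map_flatMap]
  -- reduce the LHS to uniform blocks: for each padded unit i, R copies of pvInner lst n un i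
  have hblocks : ∀ i ∈ List.range c,
      (((List.range (un*R)).map (fun s => i*(un*R) + s)).map (fun k => ((k:Nat):Int))).map
        (fun t =>
          if PySem.Int.floordiv t (((un:Nat):Int) * ((R:Nat):Int)) * ((un:Nat):Int)
              + PySem.Int.mod t ((un:Nat):Int) < ((n:Nat):Int)
          then (PySem.List.pyGet? lst (PySem.Int.floordiv t (((un:Nat):Int) * ((R:Nat):Int)) * ((un:Nat):Int)
              + PySem.Int.mod t ((un:Nat):Int))).getD none
          else none)
      = (List.range R).flatMap (fun _ => pvInner lst n un i) := by
    intro i _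
    rw [pvRangeMulFlatMap' un R, List.map_flatMap, List.map_flatMap, List.map_flatMap]
    apply pvFlatMapCongr
    intro r hrR
    rw [List.map_map, List.map_map, List.map_map]
    unfold pvInner
    apply List.map_congr_left
    intro s hsu
    have hr' : r < R := List.mem_range.mp hrR
    have hs' : s < un := List.mem_range.mp hsu
    have hcomm : un*R = R*un := Nat.mul_comm un R
    have hrs : r*un + s < un*R := by
      have h1 := Nat.mul_le_mul_right un (show r+1 ≤ R by omega)
      have h2 : (r+1)*un = r*un + un := Nat.succ_mul r un
      omega
    have hTdiv : (i*(un*R) + (r*un + s)) / (un*R) = i := by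
      rw [show i*(un*R) + (r*un+s) = (r*un+s) + i*(un*R) by ring,
        Nat.add_mul_div_right _ _ hP, Nat.div_eq_of_lt hrs, Nat.zero_add]
    have hTmod : (i*(un*R) + (r*un + s)) % un = s := by
      rw [show i*(un*R) + (r*un+s) = s + (r + i*R)*un by rw [hcomm]; ring,
        Nat.add_mul_mod_self_right, Nat.mod_eq_of_lt hs']
    simp only [Function.comp]
    have hfd : PySem.Int.floordiv (((i*(un*R) + (r*un + s) : Nat)):Int)
        (((un:Nat):Int) * ((R:Nat):Int)) = ((i:Nat):Int) := by
      rw [show ((un:Nat):Int) * ((R:Nat):Int) = ((un*R : Nat):Int) by push_cast; ring,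
        PySem.Int.floordiv_natCast, hTdiv]
    have hmd : PySem.Int.mod (((i*(un*R) + (r*un + s) : Nat)):Int) ((un:Nat):Int)
        = ((s:Nat):Int) := by
      rw [PySem.Int.mod_natCast, hTmod]
    rw [hfd, hmd,
      show ((i:Nat):Int) * ((un:Nat):Int) + ((s:Nat):Int) = ((i*un + s : Nat):Int) by push_cast; ring]
    by_cases hcase : i*un + s < n
    · rw [if_pos (show (((i*un + s : Nat)):Int) < ((n:Nat):Int) by exact_mod_cast hcase), if_pos hcase,
        PySem.List.pyGet?_natCast, List.getD_eq_getElem?_getD]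
    · rw [if_neg (show ¬ (((i*un + s : Nat)):Int) < ((n:Nat):Int) by exact_mod_cast hcase), if_neg hcase]
  rw [pvFlatMapCongr hblocks]
  -- now match the closed form pvCF
  unfold pvCF
  rw [← hn, ← hq]
  by_cases hrem : n % un = 0
  · -- no partial unit: c = q and the trailing block is empty
    have hcq : c = q := by
      rcases Nat.eq_zero_or_pos n with h0 | h0
      · rw [hc, hq, h0]; simp [Nat.div_eq_of_lt (by omega : un - 1 < un)]
      · have hnq : n = q*un := by omega
        rw [hc, show n + un - 1 = (un - 1) + q*un by omega,
          Nat.add_mul_div_right _ _ hun, Nat.div_eq_of_lt (by omega), Nat.zero_add]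
    have hdrop : items.toList.drop (un*q) = [] := by
      apply List.drop_eq_nil_of_le
      omega
    rw [hcq, hdrop]
    simp only [List.map_nil, hrem, ne_eq, not_true_eq_false, if_false, List.append_nil,
      pvRepNat, pvFlatMapNilConst, List.append_nil]
    apply pvFlatMapCongr
    intro i hi
    have hi' : i < q := List.mem_range.mp hi
    have hfull : i*un + un ≤ lst.length := by
      rw [hlen]
      have h1 := Nat.mul_le_mul_right un (show i+1 ≤ q by omega)
      have h2 : (i+1)*un = i*un + un := Nat.succ_mul i un
      omega
    rw [show pvInner lst n un i = pvInner lst lst.length un i by rw [hlen],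
      pvInnerFull lst un i hfull, hlst, ← List.map_drop, ← List.map_take]
  · -- a partial unit: c = q + 1 and the last block is the tail padded with None
    have hr1 : 1 ≤ n % un := by omega
    have hmlt : n % un < un := Nat.mod_lt _ hun
    have hcq : c = q + 1 := by
      rw [hc, show n + un - 1 = (n % un - 1) + (q+1)*un by
          have h2 : (q+1)*un = q*un + un := Nat.succ_mul q un
          omega,
        Nat.add_mul_div_right _ _ hun, Nat.div_eq_of_lt (by omega), Nat.zero_add]
    rw [hcq, List.range_succ, List.flatMap_append, List.flatMap_cons, List.flatMap_nil,
      List.append_nil]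
    simp only [hrem, ne_eq, not_false_eq_true, if_true, pvRepNat]
    congr 1
    · apply pvFlatMapCongr
      intro i hi
      have hi' : i < q := List.mem_range.mp hi
      have hfull : i*un + un ≤ lst.length := by
        rw [hlen]
        have h1 := Nat.mul_le_mul_right un (show i+1 ≤ q by omega)
        have h2 : (i+1)*un = i*un + un := Nat.succ_mul i un
        omega
      rw [show pvInner lst n un i = pvInner lst lst.length un i by rw [hlen],
        pvInnerFull lst un i hfull, hlst, ← List.map_drop, ← List.map_take]
    · have hq1 : un*q ≤ lst.length := by rw [hlen]; omega
      have hq2 : lst.length < un*q + un := by rw [hlen]; omega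
      rw [show pvInner lst n un q = pvInner lst lst.length un q by rw [hlen],
        pvInnerLast lst un q hq1 hq2, hlen, hlst, ← List.map_drop]

theorem pvB_neg (items : String) (unit reps : Int) (hu : unit < 0) :
    playback_iter_alt items unit reps = [] := by
  simp only [playback_iter_alt, List.length_map]
  have hq0 : 0 ≤ PySem.Int.floordiv (-(items.toList.length:Int)) unit := by
    by_contra h
    have hqr := PySem.Int.floordiv_mul_add_mod (-(items.toList.length:Int)) unit
    have hrb := PySem.Int.mod_neg_bounds (-(items.toList.length:Int)) hu
    have hq1 : PySem.Int.floordiv (-(items.toList.length:Int)) unit ≤ -1 := by omega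
    have hmul : (-1) * unit ≤ PySem.Int.floordiv (-(items.toList.length:Int)) unit * unit :=
      mul_le_mul_of_nonpos_right hq1 hu.le
    have hn0 : (0:Int) ≤ (items.toList.length:Int) := Int.natCast_nonneg _
    omega
  have hmax : max 0 (-(PySem.Int.floordiv (-(items.toList.length:Int)) unit)) = 0 := by omega
  rw [hmax, zero_mul]
  rfl

theorem pvB_nonposReps (items : String) (unit reps : Int) (hu : 0 < unit) (hr : reps ≤ 0) :
    playback_iter_alt items unit reps = [] := by
  simp only [playback_iter_alt, List.length_map]
  have hq0 : 0 ≤ max 0 (-(PySem.Int.floordiv (-(items.toList.length:Int)) unit)) := le_max_left _ _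
  have hper : unit * reps ≤ 0 := mul_nonpos_of_nonneg_of_nonpos hu.le hr
  rw [PySem.List.pyRange_one_eq_nil (mul_nonpos_of_nonneg_of_nonpos hq0 hper)]
  rfl

theorem pvCF_nonposReps (items : String) (un : Nat) (reps : Int) (hr : reps ≤ 0) :
    pvCF items un reps = [] := by
  simp only [pvCF, pvRepNonpos _ _ hr, List.append_nil]
  exact pvFlatMapNilConst _

-- ===== VERDICT (by name: the statement is the Claim_ definition above) =====
theorem playback_iter_spec : Claim_equal_playback_iter := by
  intro items unit reps _ hu
  unfold Spec_playback_iter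
  rcases lt_or_gt_of_ne hu with hneg | hpos
  · rw [pvA_neg items unit reps hneg, pvB_neg items unit reps hneg]
  · have h : unit = ((unit.toNat : Nat) : Int) := (Int.toNat_of_nonneg hpos.le).symm
    rcases (by omega : reps ≤ 0 ∨ 0 < reps) with hr | hr
    · rw [h, pvA_pos items unit.toNat reps (by omega), pvCF_nonposReps items _ reps hr,
        ← h, pvB_nonposReps items unit reps hpos hr]
    · have hrr : reps = ((reps.toNat : Nat) : Int) := (Int.toNat_of_nonneg hr.le).symm
      rw [h, hrr, pvA_pos items unit.toNat _ (by omega),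
        pvB_pos items unit.toNat reps.toNat (by omega) (by omega)]
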